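-- pv_equiv track=rewrite | github.com/fatsosofit99/laamkiubui_selfuse | 17.3x/词性标注与向量化/FOCALLOSS (1).py | build_pos_vocab
-- ===== SOURCE A (Python) =====
-- from typing import List, Tuple, Dict
--
-- def build_pos_vocab(data: List[List[Tuple[str, str]]]) -> Dict[str, int]:
--     tag_set = set()
--     for sent in data:
--         for _,tag in sent:
--             tag_set.add(tag)
--     sorted_tags = sorted(tag_set)
--     tag_to_idx = {tag: idx for idx, tag in enumerate(sorted_tags)}
--     return tag_to_idx
-- ===== SOURCE B (Python) =====
-- def build_pos_vocab(data):
--     all_tags = []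
--     for sent in data:
--         for _, tag in sent:
--             all_tags.append(tag)
--     all_tags.sort()
--     tag_to_idx = {}
--     next_idx = 0
--     for tag in all_tags:
--         if tag not in tag_to_idx:
--             tag_to_idx[tag] = next_idx
--             next_idx += 1
--     return tag_to_idx
-- ===== Notes on version B (the rewrite author's own statement) =====
-- stated objective: alternative
-- what changed: Instead of deduplicating into a set and sorting the distinct tags, B flattens all tags into one list, sorts the whole multiset, and assigns consecutive indices in a single pass that skips tags already indexed.
import Mathlib
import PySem

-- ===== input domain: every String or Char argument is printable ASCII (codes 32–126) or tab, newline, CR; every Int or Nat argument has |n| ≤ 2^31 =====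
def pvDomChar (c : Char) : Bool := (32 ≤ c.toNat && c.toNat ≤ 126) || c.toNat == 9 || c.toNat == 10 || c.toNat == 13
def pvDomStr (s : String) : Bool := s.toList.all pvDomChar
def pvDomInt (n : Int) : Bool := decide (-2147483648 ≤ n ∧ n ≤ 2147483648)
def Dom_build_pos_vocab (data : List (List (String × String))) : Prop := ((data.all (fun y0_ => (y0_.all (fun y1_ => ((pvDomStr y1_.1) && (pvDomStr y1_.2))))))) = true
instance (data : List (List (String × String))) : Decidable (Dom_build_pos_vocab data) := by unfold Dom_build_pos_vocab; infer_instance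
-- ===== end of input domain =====

-- B replaces A's set-then-sort by sort-whole-multiset-then-dedup-in-one-indexing-pass; return values are proved equal (alternative decomposition, no speed claim).

-- ===== PORT A =====
def build_pos_vocab (data : List (List (String × String))) : List (String × Int) :=
  let tag_set : PySem.Set String :=
    data.foldl (fun s sent => sent.foldl (fun s p => PySem.Set.add s p.2) s) PySem.Set.empty
  let sorted_tags := PySem.List.sorted tag_set (fun x => x) false
  let tag_to_idx : PySem.Dict String Int :=
    (PySem.List.enumerate sorted_tags 0).foldl (fun d p => d.insert p.2 p.1) PySem.Dict.empty
  tag_to_idx.items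

-- ===== PORT B =====
def build_pos_vocab_alt (data : List (List (String × String))) : List (String × Int) :=
  let all_tags : List String :=
    data.foldl (fun acc sent => sent.foldl (fun acc p => acc ++ [p.2]) acc) []
  let sorted_all := PySem.List.sorted all_tags (fun x => x) false
  let st :=
    sorted_all.foldl
      (fun (st : PySem.Dict String Int × Int) t =>
        if st.1.contains t then st else (st.1.insert t st.2, st.2 + 1))
      (PySem.Dict.empty, 0)
  st.1.items

-- ===== PRECONDITION & SPEC =====
def Spec_build_pos_vocab (data : List (List (String × String))) (out : List (String × Int)) : Prop := out = build_pos_vocab_alt data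
instance (data : List (List (String × String))) (out : List (String × Int)) : Decidable (Spec_build_pos_vocab data out) := by unfold Spec_build_pos_vocab; infer_instance

-- ===== CLAIM (what is proved, stated in full; the proofs are below) =====
def Claim_equal_build_pos_vocab : Prop := ∀ (data : List (List (String × String))), Dom_build_pos_vocab data → Spec_build_pos_vocab data (build_pos_vocab data)

-- ===== LEMMAS AND PROOFS =====

-- first occurrences of elements not yet seen, in order
def firstNew (seen : List String) : List String → List String
  | [] => []
  | t :: ys => if t ∈ seen then firstNew seen ys else t :: firstNew (t :: seen) ys

theorem firstNew_sublist (l : List String) : ∀ seen, (firstNew seen l).Sublist l := by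
  induction l with
  | nil => intro seen; simp [firstNew]
  | cons t ys ih =>
    intro seen
    by_cases h : t ∈ seen
    · simpa [firstNew, h] using (ih seen).cons t
    · simpa [firstNew, h] using (ih (t :: seen)).cons₂ t

theorem mem_firstNew (l : List String) : ∀ seen x, x ∈ firstNew seen l ↔ x ∈ l ∧ x ∉ seen := by
  induction l with
  | nil => intro seen x; simp [firstNew]
  | cons t ys ih =>
    intro seen x
    by_cases h : t ∈ seen
    · simp only [firstNew, if_pos h, ih, List.mem_cons]
      constructor
      · rintro ⟨hy, hs⟩; exact ⟨Or.inr hy, hs⟩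
      · rintro ⟨hy | hy, hs⟩
        · exact absurd (hy ▸ h) hs
        · exact ⟨hy, hs⟩
    · simp only [firstNew, if_neg h, List.mem_cons, ih]
      by_cases hxt : x = t
      · subst hxt; tauto
      · tauto

theorem nodup_firstNew (l : List String) : ∀ seen, (firstNew seen l).Nodup := by
  induction l with
  | nil => intro seen; simp [firstNew]
  | cons t ys ih =>
    intro seen
    by_cases h : t ∈ seen
    · simpa [firstNew, h] using ih seen
    · simp only [firstNew, if_neg h, List.nodup_cons]
      refine ⟨fun hm => ?_, ih _⟩
      exact ((mem_firstNew ys (t :: seen) t).1 hm).2 (List.mem_cons_self)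

theorem firstNew_congr (l : List String) :
    ∀ s s', (∀ x, x ∈ s ↔ x ∈ s') → firstNew s l = firstNew s' l := by
  induction l with
  | nil => intro s s' _; rfl
  | cons t ys ih =>
    intro s s' hss
    by_cases h : t ∈ s
    · simp [firstNew, h, (hss t).1 h, ih s s' hss]
    · have h' : t ∉ s' := fun hx => h ((hss t).2 hx)
      simp only [firstNew, if_neg h, if_neg h']
      refine congrArg _ (ih _ _ ?_)
      intro x; simp [List.mem_cons, hss x]

-- A's nested set-building loop builds set(flatten of tags)
theorem setBuild_eq (data : List (List (String × String))) :
    ∀ s : PySem.Set String,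
      data.foldl (fun s sent => sent.foldl (fun s p => PySem.Set.add s p.2) s) s
        = PySem.Set.update s (data.flatMap (fun sent => sent.map (·.2))) := by
  induction data with
  | nil => intro s; simp [PySem.Set.update]
  | cons sent rest ih =>
    intro s
    simp only [List.foldl_cons, List.flatMap_cons, ih]
    rw [← PySem.Set.update_map_eq_foldl_add]
    simp [PySem.Set.update, List.foldl_append]

-- B's nested flatten loop builds the flatten of tags
theorem flatten_eq (data : List (List (String × String))) :
    ∀ acc : List String,
      data.foldl (fun acc sent => sent.foldl (fun acc p => acc ++ [p.2]) acc) acc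
        = acc ++ data.flatMap (fun sent => sent.map (·.2)) := by
  induction data with
  | nil => intro acc; simp
  | cons sent rest ih =>
    intro acc
    have inner : ∀ (sent : List (String × String)) (a : List String),
        sent.foldl (fun acc p => acc ++ [p.2]) a = a ++ sent.map (·.2) := by
      intro sent
      induction sent with
      | nil => intro a; simp
      | cons p ps ihp => intro a; simp [ihp]
    simp [inner, List.flatMap_def]

-- B's indexing pass appends one (tag, index) pair per first-new tag
theorem bloop (ys : List String) :
    ∀ (d : PySem.Dict String Int) (n : Int),
      (ys.foldl
        (fun (st : PySem.Dict String Int × Int) t =>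
          if st.1.contains t then st else (st.1.insert t st.2, st.2 + 1))
        (d, n)).1.items
      = d.items ++ (PySem.List.enumerate (firstNew d.keys ys) n).map (fun p => (p.2, p.1)) := by
  induction ys with
  | nil => intro d n; simp [firstNew]
  | cons t ys ih =>
    intro d n
    by_cases h : d.contains t = true
    · have hk : t ∈ d.keys := (PySem.Dict.contains_iff_mem_keys _ _).1 h
      simp only [List.foldl_cons, h, if_true, firstNew, hk, ih]
    · have hf : d.contains t = false := by simpa using h
      have hk : t ∉ d.keys := fun hm => h ((PySem.Dict.contains_iff_mem_keys _ _).2 hm)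
      simp only [List.foldl_cons, hf, Bool.false_eq_true, if_false, firstNew, hk, ih]
      rw [PySem.Dict.items_insert_of_not_contains d n hf,
          firstNew_congr ys (d.insert t n).keys (t :: d.keys) (by
            intro x
            rw [PySem.Dict.keys_insert_of_not_contains d n hf]
            simp [or_comm]),
          PySem.List.enumerate_cons]
      simp

theorem core (tags : List String) :
    firstNew [] (PySem.List.sorted tags (fun x => x) false)
      = PySem.List.sorted (PySem.Set.ofList tags) (fun x => x) false := by
  set l := PySem.List.sorted tags (fun x => x) false with hl
  have hsub : (firstNew [] l).Sublist l := firstNew_sublist l []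
  have hnd : (firstNew [] l).Nodup := nodup_firstNew l []
  have hle : (firstNew [] l).Pairwise (fun a b => a ≤ b) :=
    (PySem.List.sorted_pairwise tags (fun x => x)).sublist hsub
  have hlt : (firstNew [] l).Pairwise (fun a b => a < b) := by
    have := hle.and hnd
    exact this.imp (fun {a b} hab => lt_of_le_of_ne hab.1 hab.2)
  have hperm : (firstNew [] l).Perm (PySem.Set.ofList tags) := by
    rw [List.perm_ext_iff_of_nodup hnd (PySem.Set.nodup_ofList tags)]
    intro x
    rw [mem_firstNew, PySem.Set.mem_ofList, hl, PySem.List.mem_sorted]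
    simp
  exact (PySem.List.sorted_eq_of_perm_of_pairwise_lt _ _ (fun x => x) hperm hlt).symm

theorem aloop (zs : List String) (hnd : zs.Nodup) :
    ((PySem.List.enumerate zs 0).foldl (fun d p => d.insert p.2 p.1) PySem.Dict.empty).items
      = (PySem.List.enumerate zs 0).map (fun p => (p.2, p.1)) := by
  have := PySem.Dict.items_foldl_insert_fresh (PySem.List.enumerate zs 0)
    (fun p => p.2) (fun p => p.1) PySem.Dict.empty
    (fun a _ => PySem.Dict.contains_empty _)
    (by rw [PySem.List.map_snd_enumerate]; exact hnd)
  simpa using this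

-- ===== VERDICT (by name: the statement is the Claim_ definition above) =====
theorem build_pos_vocab_spec : Claim_equal_build_pos_vocab := by
  intro data _
  unfold Spec_build_pos_vocab build_pos_vocab build_pos_vocab_alt
  rw [setBuild_eq, flatten_eq, bloop]
  set tags := data.flatMap (fun sent => sent.map (·.2)) with htags
  have hset : PySem.Set.update PySem.Set.empty tags = PySem.Set.ofList tags := by
    simp [PySem.Set.empty, PySem.Set.update_nil_left]
  rw [hset, List.nil_append]
  rw [aloop _ (((PySem.List.sorted_perm (PySem.Set.ofList tags) (fun x => x) false).nodup_iff).2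
        (PySem.Set.nodup_ofList tags))]
  have hk : (PySem.Dict.empty : PySem.Dict String Int).keys = [] := rfl
  have hi : (PySem.Dict.empty : PySem.Dict String Int).items = [] := rfl
  rw [hk, hi, core, List.nil_append]
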